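-- pv_equiv track=rewrite | github.com/Samira0250/python-translation-project | translate.py | get_all_translations
-- ===== SOURCE A (Python) =====
-- def translate_sequence(rna_sequence, genetic_code):
--     rna_sequence = rna_sequence.upper()
--     protein = ""
--
--     if len(rna_sequence) < 3:
--         return ""
--
--     for i in range(0, len(rna_sequence) - 2, 3):
--         codon = rna_sequence[i:i+3]
--
--         if codon not in genetic_code:
--             continue
--
--         amino_acid = genetic_code[codon]
--
--         if amino_acid == "*":
--             break
--
--         protein += amino_acid
--
--     return protein
--
-- def get_all_translations(rna_sequence, genetic_code):
--     rna_sequence = rna_sequence.upper()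
--     peptides = []
--
--     for i in range(len(rna_sequence) - 2):
--         if rna_sequence[i:i+3] == "AUG":
--             peptide = translate_sequence(
--                 rna_sequence=rna_sequence[i:],
--                 genetic_code=genetic_code
--             )
--             if peptide:
--                 peptides.append(peptide)
--
--     return peptides
-- ===== SOURCE B (Python) =====
-- def get_all_translations(rna_sequence, genetic_code):
--     s = rna_sequence.upper()
--     n = len(s)
--     # t[i] = translation of the reading frame starting at i (computed right-to-left, O(n + output))
--     t = [""] * (n + 3)
--     for i in range(n - 3, -1, -1):
--         codon = s[i:i+3]
--         if codon in genetic_code: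
--             aa = genetic_code[codon]
--             t[i] = "" if aa == "*" else aa + t[i + 3]
--         else:
--             t[i] = t[i + 3]
--     return [t[i] for i in range(n - 2) if s[i:i+3] == "AUG" and t[i]]
-- ===== Notes on version B (the rewrite author's own statement) =====
-- stated objective: alternative
-- what changed: Instead of re-slicing the suffix and re-translating it for every AUG occurrence, B fills a table right-to-left with the translation starting at each position (t[i] built from t[i+3]) and then collects t[i] at AUG positions in one pass; it trades A's per-AUG re-translation work for tabulating every position.
import Mathlib
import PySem

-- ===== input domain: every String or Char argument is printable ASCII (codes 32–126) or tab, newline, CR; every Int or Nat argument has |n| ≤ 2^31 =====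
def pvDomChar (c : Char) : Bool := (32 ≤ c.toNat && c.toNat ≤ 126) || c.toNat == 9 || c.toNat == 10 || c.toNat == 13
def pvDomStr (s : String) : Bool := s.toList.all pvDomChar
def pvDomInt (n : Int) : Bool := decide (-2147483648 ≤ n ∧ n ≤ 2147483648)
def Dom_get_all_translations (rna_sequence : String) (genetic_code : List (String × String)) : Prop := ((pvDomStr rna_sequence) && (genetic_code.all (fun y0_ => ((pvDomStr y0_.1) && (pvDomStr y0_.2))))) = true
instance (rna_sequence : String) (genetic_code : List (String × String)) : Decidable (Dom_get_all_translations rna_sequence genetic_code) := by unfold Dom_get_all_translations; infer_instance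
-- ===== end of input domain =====

-- B replaces A's per-AUG suffix re-translation by one right-to-left pass that tabulates the
-- translation starting at every position (t[i] built from t[i+3]); objective: alternative algorithm.

-- ===== PORT A =====
-- the for-loop of translate_sequence, over the index list of range(0, len-2, 3);
-- 'continue' = recurse unchanged, 'break' on '*' = stop and return the accumulator
def aLoop (u : List Char) (code : List (String × String)) : List Int → List Char → List Char
  | [], protein => protein
  | i :: rest, protein =>
    match PySem.Dict.get? (PySem.Dict.mk code) (String.ofList (PySem.List.slice u (some i) (some (i + 3)))) with
    | none => aLoop u code rest protein
    | some aa => if aa = "*" then protein else aLoop u code rest (protein ++ aa.toList)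

def translate_sequence (rna_sequence : String) (genetic_code : List (String × String)) : String :=
  let u := PySem.Chars.upper rna_sequence.toList
  if u.length < 3 then "" else
    String.ofList (aLoop u genetic_code (PySem.List.pyRange 0 ((u.length : Int) - 2) 3) [])

def get_all_translations (rna_sequence : String) (genetic_code : List (String × String)) : List String :=
  let u := PySem.Chars.upper rna_sequence.toList
  (PySem.List.pyRange 0 ((u.length : Int) - 2) 1).foldl
    (fun peptides i =>
      if PySem.List.slice u (some i) (some (i + 3)) = ['A', 'U', 'G'] then
        let peptide := translate_sequence (String.ofList (PySem.List.slice u (some i) none)) genetic_code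
        if peptide ≠ "" then peptides ++ [peptide] else peptides
      else peptides) []

-- ===== PORT B =====
-- one iteration of B's right-to-left filling of the table t (t[i] = translation starting at i)
def bStep (u : List Char) (code : List (String × String))
    (t : PySem.Dict Int (List Char)) (i : Int) : PySem.Dict Int (List Char) :=
  match PySem.Dict.get? (PySem.Dict.mk code) (String.ofList (PySem.List.slice u (some i) (some (i + 3)))) with
  | some aa => t.insert i (if aa = "*" then [] else aa.toList ++ t.getD (i + 3) [])
  | none => t.insert i (t.getD (i + 3) [])

def get_all_translations_alt (rna_sequence : String) (genetic_code : List (String × String)) : List String :=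
  let u := PySem.Chars.upper rna_sequence.toList
  let n : Int := u.length
  let t := (PySem.List.pyRange (n - 3) (-1) (-1)).foldl (bStep u genetic_code) (PySem.Dict.mk [])
  (PySem.List.pyRange 0 (n - 2) 1).foldl
    (fun acc i =>
      if PySem.List.slice u (some i) (some (i + 3)) = ['A', 'U', 'G'] ∧ t.getD i [] ≠ [] then
        acc ++ [String.ofList (t.getD i [])]
      else acc) []

-- ===== PRECONDITION & SPEC =====
def Spec_get_all_translations (rna_sequence : String) (genetic_code : List (String × String)) (out : List String) : Prop := out = get_all_translations_alt rna_sequence genetic_code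
instance (rna_sequence : String) (genetic_code : List (String × String)) (out : List String) : Decidable (Spec_get_all_translations rna_sequence genetic_code out) := by unfold Spec_get_all_translations; infer_instance

-- ===== CLAIM (what is proved, stated in full; the proofs are below) =====
def Claim_equal_get_all_translations : Prop := ∀ (rna_sequence : String) (genetic_code : List (String × String)), Dom_get_all_translations rna_sequence genetic_code → Spec_get_all_translations rna_sequence genetic_code (get_all_translations rna_sequence genetic_code)

-- ===== LEMMAS AND PROOFS =====

-- reference function: translation of the frame starting at position j (what both programs compute)
def tf (u : List Char) (code : List (String × String)) (j : Nat) : List Char :=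
  if u.length < j + 3 then [] else
    match PySem.Dict.get? (PySem.Dict.mk code) (String.ofList ((u.drop j).take 3)) with
    | some aa => if aa = "*" then [] else aa.toList ++ tf u code (j + 3)
    | none => tf u code (j + 3)
termination_by u.length - j
decreasing_by all_goals omega

theorem upperChar_idem (c : Char) :
    PySem.Chars.upperChar (PySem.Chars.upperChar c) = PySem.Chars.upperChar c := by
  unfold PySem.Chars.upperChar PySem.Chars.islower
  split_ifs with h1 h2 <;> try rfl
  exfalso
  simp only [Bool.and_eq_true, decide_eq_true_eq, Char.le_def] at h1 h2
  obtain ⟨ha, hb⟩ := h1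
  obtain ⟨hc, hd⟩ := h2
  have ha' : 97 ≤ c.toNat := ha
  have hb' : c.toNat ≤ 122 := hb
  have hv : (c.toNat - 32).isValidChar := by
    constructor; omega
  have ht : (Char.ofNat (c.toNat - 32)).toNat = c.toNat - 32 := by
    unfold Char.ofNat
    rw [dif_pos hv]
    exact Char.toNat_ofNatAux hv
  have hc' : 97 ≤ (Char.ofNat (c.toNat - 32)).toNat := hc
  omega

theorem upper_idem (l : List Char) :
    PySem.Chars.upper (PySem.Chars.upper l) = PySem.Chars.upper l := by
  simp [PySem.Chars.upper, upperChar_idem]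

theorem slice_take (u : List Char) (k : Nat) :
    PySem.List.slice u (some (k : Int)) (some ((k : Int) + 3)) = (u.drop k).take 3 := by
  simp only [PySem.List.slice, PySem.List.clampIdx]
  have h3 : ((k : Int) + 3) = ((k + 3 : Nat) : Int) := by push_cast; ring
  rw [h3]
  simp only [Int.toNat_natCast]
  split_ifs with h1 h2 h2 <;> try omega
  by_cases hk : k ≤ u.length
  · have : min k u.length = k := by omega
    rw [this]
    by_cases hk3 : k + 3 ≤ u.length
    · have : min (k+3) u.length = k + 3 := by omega
      rw [this]
      have : (k + 3 : Nat) - k = 3 := by omega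
      rw [this]
    · have h4 : min (k+3) u.length = u.length := by omega
      rw [h4]
      rw [List.take_of_length_le (by simp), List.take_of_length_le (by simp; omega)]
  · have hk' : u.length < k := by omega
    have h5 : min k u.length = u.length := by omega
    have h6 : min (k+3) u.length = u.length := by omega
    rw [h5, h6]
    simp [List.drop_of_length_le (le_of_lt hk'), List.drop_of_length_le]

theorem tf_nil (u : List Char) (code : List (String × String)) (j : Nat)
    (h : u.length < j + 3) : tf u code j = [] := by
  rw [tf]; simp [h]

theorem tf_cons (u : List Char) (code : List (String × String)) (j : Nat)
    (h : ¬ u.length < j + 3) :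
    tf u code j
      = match PySem.Dict.get? (PySem.Dict.mk code) (String.ofList ((u.drop j).take 3)) with
        | some aa => if aa = "*" then [] else aa.toList ++ tf u code (j + 3)
        | none => tf u code (j + 3) := by
  rw [tf, if_neg h]

theorem aLoop_append (u : List Char) (code : List (String × String))
    (idxs : List Int) (p : List Char) :
    aLoop u code idxs p = p ++ aLoop u code idxs [] := by
  induction idxs generalizing p with
  | nil => simp [aLoop]
  | cons i rest ih =>
    cases hm : PySem.Dict.get? (PySem.Dict.mk code)
        (String.ofList (PySem.List.slice u (some i) (some (i + 3)))) with
    | none => simp only [aLoop, hm]; exact ih p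
    | some aa =>
      by_cases ha : aa = "*"
      · simp [aLoop, hm, ha]
      · simp only [aLoop, hm, if_neg ha]
        rw [ih (p ++ aa.toList), ih (List.nil ++ aa.toList)]
        simp

theorem pyRange3_cons {a b : Int} (h : a < b) :
    PySem.List.pyRange a b 3 = a :: PySem.List.pyRange (a + 3) b 3 := by
  rw [PySem.List.pyRange_of_pos a b (by norm_num), PySem.List.pyRange_of_pos (a+3) b (by norm_num)]
  by_cases h3 : a + 3 < b
  · have hm : ((b - a + 3 - 1) / 3).toNat = ((b - (a+3) + 3 - 1) / 3).toNat + 1 := by omega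
    rw [if_pos h, if_pos h3, hm, List.range_succ_eq_map]
    simp only [List.map_cons, List.map_map, Nat.cast_zero, mul_zero, add_zero]
    congr 1
    apply List.map_congr_left
    intro k _
    simp only [Function.comp_apply]
    push_cast
    ring
  · have hm : ((b - a + 3 - 1) / 3).toNat = 1 := by omega
    rw [if_pos h, if_neg h3, hm]
    simp

theorem aLoop_eq_tf_fuel (u : List Char) (code : List (String × String)) :
    ∀ (fuel j : Nat), u.length ≤ j + fuel →
      aLoop u code (PySem.List.pyRange (j : Int) ((u.length : Int) - 2) 3) [] = tf u code j := by
  intro fuel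
  induction fuel with
  | zero =>
    intro j hj
    have h : u.length < j + 3 := by omega
    rw [PySem.List.pyRange_of_pos _ _ (by norm_num), if_neg (by omega), tf_nil u code j h]
    simp [aLoop]
  | succ fuel ih =>
    intro j hj
    by_cases h : u.length < j + 3
    · rw [PySem.List.pyRange_of_pos _ _ (by norm_num), if_neg (by omega), tf_nil u code j h]
      simp [aLoop]
    · have hlt : (j : Int) < (u.length : Int) - 2 := by omega
      have hc : ((j : Int) + 3) = (((j + 3 : Nat)) : Int) := by push_cast; ring
      rw [pyRange3_cons hlt, tf_cons u code j h]
      simp only [aLoop]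
      rw [slice_take u j]
      cases hm : PySem.Dict.get? (PySem.Dict.mk code)
          (String.ofList ((u.drop j).take 3)) with
      | none =>
        show aLoop u code (PySem.List.pyRange ((j : Int) + 3) ((u.length : Int) - 2) 3) []
          = tf u code (j + 3)
        rw [hc]
        exact ih (j + 3) (by omega)
      | some aa =>
        show (if aa = "*" then []
            else aLoop u code (PySem.List.pyRange ((j : Int) + 3) ((u.length : Int) - 2) 3)
              ([] ++ aa.toList))
          = if aa = "*" then [] else aa.toList ++ tf u code (j + 3)
        by_cases ha : aa = "*"
        · rw [if_pos ha, if_pos ha]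
        · rw [if_neg ha, if_neg ha, aLoop_append, hc, ih (j + 3) (by omega)]
          simp

theorem tf_drop (u : List Char) (code : List (String × String)) (k : Nat) :
    ∀ (fuel j : Nat), u.length ≤ k + j + fuel →
      tf (u.drop k) code j = tf u code (k + j) := by
  intro fuel
  induction fuel with
  | zero =>
    intro j hj
    rw [tf_nil _ _ _ (by rw [List.length_drop]; omega), tf_nil _ _ _ (by omega)]
  | succ fuel ih =>
    intro j hj
    by_cases h : u.length < k + j + 3
    · rw [tf_nil _ _ _ (by rw [List.length_drop]; omega), tf_nil _ _ _ (by omega)]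
    · rw [tf_cons _ _ _ (by rw [List.length_drop]; omega), tf_cons _ _ _ (by omega : ¬ u.length < (k + j) + 3),
        List.drop_drop]
      have hassoc : k + (j + 3) = k + j + 3 := by omega
      rw [ih (j + 3) (by omega), hassoc]

theorem translate_eq (u : List Char) (code : List (String × String)) (k : Nat)
    (hu : PySem.Chars.upper u = u) :
    translate_sequence (String.ofList (u.drop k)) code = String.ofList (tf u code k) := by
  unfold translate_sequence
  have hud : PySem.Chars.upper (String.ofList (u.drop k)).toList = u.drop k := by
    rw [String.toList_ofList]
    unfold PySem.Chars.upper at hu ⊢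
    rw [List.map_drop, hu]
  rw [hud]
  by_cases h : (u.drop k).length < 3
  · rw [if_pos h, tf_nil u code k (by rw [List.length_drop] at h; omega)]
  · rw [if_neg h]
    have h0 : ((0 : Nat) : Int) = (0 : Int) := rfl
    have ha := aLoop_eq_tf_fuel (u.drop k) code (u.drop k).length 0 (by omega)
    rw [h0] at ha
    rw [ha, tf_drop u code k u.length 0 (by omega), Nat.add_zero]

theorem empty_getD (j : Int) :
    (PySem.Dict.mk ([] : List (Int × List Char))).getD j [] = [] := rfl

theorem bFold_getD (u : List Char) (code : List (String × String)) :
    ∀ (fuel : Nat) (a : Int) (t : PySem.Dict Int (List Char)),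
      (a + 1).toNat ≤ fuel → a ≤ (u.length : Int) - 3 →
      (∀ j : Int, t.getD j [] = if a < j ∧ 0 ≤ j then tf u code j.toNat else []) →
      ∀ j : Int,
        ((PySem.List.pyRange a (-1) (-1)).foldl (bStep u code) t).getD j []
          = if 0 ≤ j then tf u code j.toNat else [] := by
  intro fuel
  induction fuel with
  | zero =>
    intro a t hf ha hinv j
    rw [PySem.List.pyRange_neg_one_eq_nil (by omega)]
    simp only [List.foldl_nil]
    rw [hinv j]
    split_ifs <;> first | rfl | omega
  | succ fuel ih =>
    intro a t hf ha hinv j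
    by_cases hneg : a ≤ -1
    · rw [PySem.List.pyRange_neg_one_eq_nil hneg]
      simp only [List.foldl_nil]
      rw [hinv j]
      split_ifs <;> first | rfl | omega
    · have ha0 : 0 ≤ a := by omega
      rw [PySem.List.pyRange_neg_one_cons (by omega), List.foldl_cons]
      refine ih (a - 1) (bStep u code t a) (by omega) (by omega) ?_ j
      intro j'
      have hcast : ((a.toNat : Int)) = a := by omega
      have hsl : PySem.List.slice u (some a) (some (a + 3)) = (u.drop a.toNat).take 3 := by
        rw [← hcast]; exact slice_take u a.toNat

      have hget3 : t.getD (a + 3) [] = tf u code (a.toNat + 3) := by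
        rw [hinv (a + 3), if_pos (by omega)]
        congr 1
        omega
      unfold bStep
      rw [hsl]
      cases hm : PySem.Dict.get? (PySem.Dict.mk code)
          (String.ofList ((u.drop a.toNat).take 3)) with
      | none =>
        have htf : tf u code a.toNat = tf u code (a.toNat + 3) := by
          rw [tf_cons u code a.toNat (by omega), hm]
        rw [PySem.Dict.getD_insert]
        by_cases hj : j' = a
        · rw [if_pos hj, hj, if_pos (show a - 1 < a ∧ 0 ≤ a by omega), hget3, htf]
        · rw [if_neg hj, hinv j']
          split_ifs <;> first | rfl | omega
      | some aa =>
        have htf : tf u code a.toNat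
            = if aa = "*" then [] else aa.toList ++ tf u code (a.toNat + 3) := by
          rw [tf_cons u code a.toNat (by omega), hm]
        rw [PySem.Dict.getD_insert]
        by_cases hj : j' = a
        · rw [if_pos hj, hj, if_pos (show a - 1 < a ∧ 0 ≤ a by omega), hget3, htf]
        · rw [if_neg hj, hinv j']
          split_ifs <;> first | rfl | omega

theorem gat_eq (rna_sequence : String) (genetic_code : List (String × String)) :
    get_all_translations rna_sequence genetic_code
      = get_all_translations_alt rna_sequence genetic_code := by
  unfold get_all_translations get_all_translations_alt
  dsimp only
  set u := PySem.Chars.upper rna_sequence.toList with hu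
  have hinv0 : ∀ j : Int,
      (PySem.Dict.mk ([] : List (Int × List Char))).getD j []
        = if (u.length : Int) - 3 < j ∧ 0 ≤ j then tf u genetic_code j.toNat else [] := by
    intro j
    rw [empty_getD]
    split_ifs with hj
    · rw [tf_nil u genetic_code j.toNat (by omega)]
    · rfl
  apply PySem.List.foldl_congr_mem
  intro acc i hi
  rw [PySem.List.mem_pyRange_one] at hi
  obtain ⟨h0, h1⟩ := hi
  have hget := bFold_getD u genetic_code (u.length + 1) ((u.length : Int) - 3)
    (PySem.Dict.mk []) (by omega) (by omega) hinv0 i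
  rw [if_pos h0] at hget
  by_cases hc : PySem.List.slice u (some i) (some (i + 3)) = ['A', 'U', 'G']
  · have hpep : translate_sequence (String.ofList (PySem.List.slice u (some i) none))
        genetic_code = String.ofList (tf u genetic_code i.toNat) := by
      rw [PySem.List.slice_from u h0]
      exact translate_eq u genetic_code i.toNat (upper_idem _)
    rw [if_pos hc]
    simp only [hpep, hget]
    by_cases hne : tf u genetic_code i.toNat = []
    · rw [if_neg (by simp [hne]), if_neg (by simp [hne])]
    · rw [if_pos (by simp [String.ofList_eq_empty_iff, hne]),
        if_pos (by simp [hc, hne])]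
  · rw [if_neg hc, if_neg (by simp [hc])]

-- ===== VERDICT (by name: the statement is the Claim_ definition above) =====
theorem get_all_translations_spec : Claim_equal_get_all_translations := by
  intro rna gc _
  unfold Spec_get_all_translations
  exact gat_eq rna gc
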